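-- pv_equiv track=rewrite | github.com/ruirui688/SLAM | tools/build_raw_evidence_audit_packet_p204.py | build_universe
-- ===== SOURCE A (Python) =====
-- from collections import Counter, defaultdict
--
-- TARGET_CATEGORIES = ["forklift", "barrier", "work table", "warehouse rack"]
--
-- TARGET_SOURCES = ["same_day", "cross_day", "cross_month", "hallway"]
--
-- TARGET_ROW_SOURCES = ["p193", "p197_boundary", "p197_pair", "p199"]
--
-- def build_universe(rows: list[dict[str, str]]) -> set[str]:
--     present_categories = {row.get("canonical_label", "") for row in rows}
--     present_sources = {row.get("source", "") for row in rows}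
--     present_row_sources = {row.get("row_source", "") for row in rows}
--     universe: set[str] = set()
--     universe.update(f"category:{name}" for name in TARGET_CATEGORIES if name in present_categories)
--     universe.update(f"source:{name}" for name in TARGET_SOURCES if name in present_sources)
--     universe.update(f"row_source:{name}" for name in TARGET_ROW_SOURCES if name in present_row_sources)
--
--     observed_category_source = Counter()
--     observed_category_row_source = Counter()
--     observed_source_row_source = Counter()
--     sessions_by_source: dict[str, set[str]] = defaultdict(set)
--     for row in rows:
--         category = row.get("canonical_label", "")
--         source = row.get("source", "")
--         row_source = row.get("row_source", "")
--         session = row.get("session_id", "")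
--         if category in TARGET_CATEGORIES and source in TARGET_SOURCES:
--             observed_category_source[f"category_source:{category}|{source}"] += 1
--         if category in TARGET_CATEGORIES and row_source in TARGET_ROW_SOURCES:
--             observed_category_row_source[f"category_row_source:{category}|{row_source}"] += 1
--         if source in TARGET_SOURCES and row_source in TARGET_ROW_SOURCES:
--             observed_source_row_source[f"source_row_source:{source}|{row_source}"] += 1
--         if source in TARGET_SOURCES and session:
--             sessions_by_source[source].add(session)
--
--     universe.update(observed_category_source)
--     universe.update(observed_category_row_source)
--     universe.update(observed_source_row_source)
--
--     for source, sessions in sessions_by_source.items():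
--         for session in sorted(sessions)[:2]:
--             universe.add(f"session:{session}")
--     return universe
-- ===== SOURCE B (Python) =====
-- TARGET_CATEGORIES = ["forklift", "barrier", "work table", "warehouse rack"]
--
-- TARGET_SOURCES = ["same_day", "cross_day", "cross_month", "hallway"]
--
-- TARGET_ROW_SOURCES = ["p193", "p197_boundary", "p197_pair", "p199"]
--
--
-- def build_universe(rows: list[dict[str, str]]) -> set[str]:
--     # One pass: the distinct (category, source, row_source) triples and the distinct
--     # (source, session) pairs, each in first-seen order; everything else is derived.
--     triples = list(dict.fromkeys(
--         (row.get("canonical_label", ""), row.get("source", ""), row.get("row_source", ""))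
--         for row in rows))
--     pairs = list(dict.fromkeys(
--         (row.get("source", ""), row.get("session_id", ""))
--         for row in rows
--         if row.get("source", "") in TARGET_SOURCES and row.get("session_id", "")))
--     universe: set[str] = set()
--     universe.update(f"category:{c}" for c in TARGET_CATEGORIES if any(t[0] == c for t in triples))
--     universe.update(f"source:{s}" for s in TARGET_SOURCES if any(t[1] == s for t in triples))
--     universe.update(f"row_source:{r}" for r in TARGET_ROW_SOURCES if any(t[2] == r for t in triples))
--     universe.update(f"category_source:{c}|{s}" for c, s, _ in triples
--                     if c in TARGET_CATEGORIES and s in TARGET_SOURCES)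
--     universe.update(f"category_row_source:{c}|{r}" for c, _, r in triples
--                     if c in TARGET_CATEGORIES and r in TARGET_ROW_SOURCES)
--     universe.update(f"source_row_source:{s}|{r}" for _, s, r in triples
--                     if s in TARGET_SOURCES and r in TARGET_ROW_SOURCES)
--     by_source: dict[str, list[str]] = {}
--     for s, e in pairs:
--         by_source.setdefault(s, []).append(e)
--     for sessions in by_source.values():
--         for session in sorted(sessions)[:2]:
--             universe.add(f"session:{session}")
--     return universe
-- ===== Notes on version B (the rewrite author's own statement) =====
-- stated objective: simpler
-- what changed: B drops A's three Counters and the per-row session defaultdict: one pass deduplicates the observed (category, source, row_source) triples and the qualifying (source, session) pairs, and every universe key is then derived from those distinct triples/pairs instead of being counted per row.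
import Mathlib
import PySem

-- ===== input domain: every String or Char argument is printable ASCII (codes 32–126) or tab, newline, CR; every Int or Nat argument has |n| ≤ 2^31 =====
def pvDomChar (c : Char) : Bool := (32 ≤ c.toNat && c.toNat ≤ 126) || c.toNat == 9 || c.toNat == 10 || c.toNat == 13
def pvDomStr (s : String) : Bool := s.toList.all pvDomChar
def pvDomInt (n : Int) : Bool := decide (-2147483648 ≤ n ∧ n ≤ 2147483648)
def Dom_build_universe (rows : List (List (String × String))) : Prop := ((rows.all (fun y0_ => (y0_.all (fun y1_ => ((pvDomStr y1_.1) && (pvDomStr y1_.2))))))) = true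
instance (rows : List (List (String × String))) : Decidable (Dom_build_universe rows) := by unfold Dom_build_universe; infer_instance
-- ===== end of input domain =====

-- B replaces A's three Counters and session defaultdict by one set of distinct observation
-- triples and distinct (source, session) pairs from which everything is derived (objective:
-- simpler). Both programs return a Python set; the ports return its elements in insertion order.

-- ===== PORT A =====
def TARGET_CATEGORIES : List String := ["forklift", "barrier", "work table", "warehouse rack"]
def TARGET_SOURCES : List String := ["same_day", "cross_day", "cross_month", "hallway"]
def TARGET_ROW_SOURCES : List String := ["p193", "p197_boundary", "p197_pair", "p199"]

-- row.get(key, "") on a Python dict row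
def rowGet (row : List (String × String)) (key : String) : String :=
  PySem.Dict.getD (PySem.Dict.mk row) key ""

-- the body of A's 'for row in rows' loop: the three Counters and sessions_by_source
def buildLoopStep
    (st : PySem.Dict String Int × PySem.Dict String Int × PySem.Dict String Int ×
          PySem.Dict String (PySem.Set String))
    (row : List (String × String)) :
    PySem.Dict String Int × PySem.Dict String Int × PySem.Dict String Int ×
      PySem.Dict String (PySem.Set String) :=
  let category := rowGet row "canonical_label"
  let source := rowGet row "source"
  let row_source := rowGet row "row_source"
  let session := rowGet row "session_id"
  let ocs := if category ∈ TARGET_CATEGORIES ∧ source ∈ TARGET_SOURCES then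
      PySem.Dict.insert st.1 ("category_source:" ++ category ++ "|" ++ source)
        (PySem.Dict.getD st.1 ("category_source:" ++ category ++ "|" ++ source) 0 + 1)
    else st.1
  let ocr := if category ∈ TARGET_CATEGORIES ∧ row_source ∈ TARGET_ROW_SOURCES then
      PySem.Dict.insert st.2.1 ("category_row_source:" ++ category ++ "|" ++ row_source)
        (PySem.Dict.getD st.2.1 ("category_row_source:" ++ category ++ "|" ++ row_source) 0 + 1)
    else st.2.1
  let osr := if source ∈ TARGET_SOURCES ∧ row_source ∈ TARGET_ROW_SOURCES then
      PySem.Dict.insert st.2.2.1 ("source_row_source:" ++ source ++ "|" ++ row_source)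
        (PySem.Dict.getD st.2.2.1 ("source_row_source:" ++ source ++ "|" ++ row_source) 0 + 1)
    else st.2.2.1
  let sbs := if source ∈ TARGET_SOURCES ∧ session ≠ "" then
      PySem.Dict.insert st.2.2.2 source
        (PySem.Set.add (PySem.Dict.getD st.2.2.2 source PySem.Set.empty) session)
    else st.2.2.2
  (ocs, ocr, osr, sbs)

def build_universe (rows : List (List (String × String))) : List String :=
  let present_categories := PySem.Set.ofList (rows.map (fun row => rowGet row "canonical_label"))
  let present_sources := PySem.Set.ofList (rows.map (fun row => rowGet row "source"))
  let present_row_sources := PySem.Set.ofList (rows.map (fun row => rowGet row "row_source"))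
  let uni : PySem.Set String := PySem.Set.empty
  let uni := PySem.Set.update uni
    ((TARGET_CATEGORIES.filter (fun name => PySem.Set.contains present_categories name)).map
      (fun name => "category:" ++ name))
  let uni := PySem.Set.update uni
    ((TARGET_SOURCES.filter (fun name => PySem.Set.contains present_sources name)).map
      (fun name => "source:" ++ name))
  let uni := PySem.Set.update uni
    ((TARGET_ROW_SOURCES.filter (fun name => PySem.Set.contains present_row_sources name)).map
      (fun name => "row_source:" ++ name))
  let st := rows.foldl buildLoopStep
    (PySem.Dict.empty, PySem.Dict.empty, PySem.Dict.empty, PySem.Dict.empty)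
  let uni := PySem.Set.update uni (PySem.Dict.keys st.1)
  let uni := PySem.Set.update uni (PySem.Dict.keys st.2.1)
  let uni := PySem.Set.update uni (PySem.Dict.keys st.2.2.1)
  let uni := (PySem.Dict.items st.2.2.2).foldl (fun u it =>
      (PySem.List.slice (PySem.List.sorted it.2 (fun x => x) false) none (some 2)).foldl
        (fun u2 session => PySem.Set.add u2 ("session:" ++ session)) u) uni
  uni

-- ===== PORT B =====
def build_universe_alt (rows : List (List (String × String))) : List String :=
  let triples := PySem.List.dedup (rows.map (fun row =>
      (rowGet row "canonical_label", rowGet row "source", rowGet row "row_source")))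
  let pairs := PySem.List.dedup (rows.filterMap (fun row =>
      if rowGet row "source" ∈ TARGET_SOURCES ∧ rowGet row "session_id" ≠ "" then
        some (rowGet row "source", rowGet row "session_id")
      else none))
  let uni : PySem.Set String := PySem.Set.empty
  let uni := PySem.Set.update uni
    ((TARGET_CATEGORIES.filter (fun c => triples.any (fun t => t.1 == c))).map
      (fun c => "category:" ++ c))
  let uni := PySem.Set.update uni
    ((TARGET_SOURCES.filter (fun s => triples.any (fun t => t.2.1 == s))).map
      (fun s => "source:" ++ s))
  let uni := PySem.Set.update uni
    ((TARGET_ROW_SOURCES.filter (fun r => triples.any (fun t => t.2.2 == r))).map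
      (fun r => "row_source:" ++ r))
  let uni := PySem.Set.update uni
    ((triples.filter (fun t => t.1 ∈ TARGET_CATEGORIES ∧ t.2.1 ∈ TARGET_SOURCES)).map
      (fun t => "category_source:" ++ t.1 ++ "|" ++ t.2.1))
  let uni := PySem.Set.update uni
    ((triples.filter (fun t => t.1 ∈ TARGET_CATEGORIES ∧ t.2.2 ∈ TARGET_ROW_SOURCES)).map
      (fun t => "category_row_source:" ++ t.1 ++ "|" ++ t.2.2))
  let uni := PySem.Set.update uni
    ((triples.filter (fun t => t.2.1 ∈ TARGET_SOURCES ∧ t.2.2 ∈ TARGET_ROW_SOURCES)).map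
      (fun t => "source_row_source:" ++ t.2.1 ++ "|" ++ t.2.2))
  let by_source := pairs.foldl
    (fun d p => PySem.Dict.insert d p.1 (PySem.Dict.getD d p.1 [] ++ [p.2])) PySem.Dict.empty
  let uni := (PySem.Dict.values by_source).foldl (fun u es =>
      (PySem.List.slice (PySem.List.sorted es (fun x => x) false) none (some 2)).foldl
        (fun u2 session => PySem.Set.add u2 ("session:" ++ session)) u) uni
  uni

-- ===== PRECONDITION & SPEC =====
def Spec_build_universe (rows : List (List (String × String))) (out : List String) : Prop := out = build_universe_alt rows
instance (rows : List (List (String × String))) (out : List String) : Decidable (Spec_build_universe rows out) := by unfold Spec_build_universe; infer_instance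

-- ===== CLAIM (what is proved, stated in full; the proofs are below) =====
def Claim_equal_build_universe : Prop := ∀ (rows : List (List (String × String))), Dom_build_universe rows → Spec_build_universe rows (build_universe rows)

-- ===== LEMMAS AND PROOFS =====

lemma update_subset_eq {α : Type} [BEq α] [LawfulBEq α] :
    ∀ (t s : List α), (∀ x ∈ t, x ∈ s) → PySem.Set.update s t = s := by
  intro t
  induction t with
  | nil => intro s _; rfl
  | cons x t ih =>
    intro s h
    rw [PySem.Set.update_cons, PySem.Set.add_of_mem (h x (by simp))]
    exact ih s (fun y hy => h y (by simp [hy]))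

lemma update_exists_append {α : Type} [BEq α] [LawfulBEq α] :
    ∀ (l s : List α), ∃ u, PySem.Set.update s l = s ++ u := by
  intro l
  induction l with
  | nil => exact fun s => ⟨[], by rw [PySem.Set.update_nil]; simp⟩
  | cons x l ih =>
    intro s
    rw [PySem.Set.update_cons]
    by_cases hx : x ∈ s
    · rcases ih s with ⟨u, hu⟩
      exact ⟨u, by rw [PySem.Set.add_of_mem hx, hu]⟩
    · rcases ih (s ++ [x]) with ⟨u, hu⟩
      exact ⟨x :: u, by rw [PySem.Set.add_of_not_mem hx, hu]; simp⟩

lemma update_filterMap_update {β α : Type} [BEq β] [LawfulBEq β] [BEq α] [LawfulBEq α] :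
    ∀ (l : List β) (f : β → Option α) (t : List β) (s : List α),
      (∀ x ∈ t, ∀ b, f x = some b → b ∈ s) →
      PySem.Set.update s ((PySem.Set.update t l).filterMap f) = PySem.Set.update s (l.filterMap f) := by
  intro l
  induction l with
  | nil =>
    intro f t s h
    show PySem.Set.update s (t.filterMap f) = PySem.Set.update s ([].filterMap f)
    rw [List.filterMap_nil, PySem.Set.update_nil]
    exact update_subset_eq _ s (by
      intro b hb
      rcases List.mem_filterMap.mp hb with ⟨x, hx, hfx⟩
      exact h x hx b hfx)
  | cons x l ih =>
    intro f t s h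
    rw [PySem.Set.update_cons (s := t)]
    cases hfx : f x with
    | none =>
      rw [show (x :: l).filterMap f = l.filterMap f by simp [hfx]]
      by_cases hx : x ∈ t
      · rw [PySem.Set.add_of_mem hx]; exact ih f t s h
      · rw [PySem.Set.add_of_not_mem hx]
        refine ih f (t ++ [x]) s ?_
        intro y hy b hb
        rcases List.mem_append.mp hy with h1 | h1
        · exact h y h1 b hb
        · simp only [List.mem_singleton] at h1; subst h1; rw [hfx] at hb; cases hb
    | some b =>
      rw [show (x :: l).filterMap f = b :: l.filterMap f by simp [hfx],
          PySem.Set.update_cons (s := s)]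
      by_cases hx : x ∈ t
      · rw [PySem.Set.add_of_mem hx, PySem.Set.add_of_mem (h x hx b hfx)]
        exact ih f t s h
      · rw [PySem.Set.add_of_not_mem hx]
        have hsub : ∀ c ∈ t.filterMap f, c ∈ s := by
          intro c hc
          rcases List.mem_filterMap.mp hc with ⟨y, hy, hfy⟩
          exact h y hy c hfy
        rcases update_exists_append l (t ++ [x]) with ⟨u, hu⟩
        have hfm : (PySem.Set.update (t ++ [x]) l).filterMap f
            = (t.filterMap f ++ [b]) ++ u.filterMap f := by
          rw [hu]; simp [List.filterMap_append, hfx]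
        have e1 : PySem.Set.update s ((PySem.Set.update (t ++ [x]) l).filterMap f)
            = PySem.Set.update (PySem.Set.add s b) (u.filterMap f) := by
          rw [hfm, PySem.Set.update_append, PySem.Set.update_append,
              update_subset_eq _ s hsub, PySem.Set.update_cons, PySem.Set.update_nil]
        have e2 : PySem.Set.update (PySem.Set.add s b) ((PySem.Set.update (t ++ [x]) l).filterMap f)
            = PySem.Set.update (PySem.Set.add s b) (u.filterMap f) := by
          rw [hfm, PySem.Set.update_append, PySem.Set.update_append,
              update_subset_eq _ _ (fun c hc => (PySem.Set.mem_add _ _ _).mpr (Or.inl (hsub c hc))),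
              PySem.Set.update_cons, PySem.Set.update_nil,
              PySem.Set.add_of_mem ((PySem.Set.mem_add _ _ _).mpr (Or.inr rfl))]
        rw [e1, ← e2]
        refine ih f (t ++ [x]) (PySem.Set.add s b) ?_
        intro y hy c hc
        rcases List.mem_append.mp hy with h1 | h1
        · exact (PySem.Set.mem_add _ _ _).mpr (Or.inl (h y h1 c hc))
        · simp only [List.mem_singleton] at h1; subst h1
          rw [hfx] at hc
          injection hc with hbc
          exact (PySem.Set.mem_add _ _ _).mpr (Or.inr hbc.symm)

lemma update_dedup {α : Type} [BEq α] [LawfulBEq α] (s l : List α) :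
    PySem.Set.update s (PySem.List.dedup l) = PySem.Set.update s l := by
  have h := update_filterMap_update l some [] s (by simp)
  simpa [List.filterMap_some, PySem.Set.update_nil_left, PySem.List.dedup_eq_ofList] using h

lemma update_filterMap_dedup {β α : Type} [BEq β] [LawfulBEq β] [BEq α] [LawfulBEq α]
    (s : List α) (l : List β) (f : β → Option α) :
    PySem.Set.update s ((PySem.List.dedup l).filterMap f) = PySem.Set.update s (l.filterMap f) := by
  have h := update_filterMap_update l f [] s (by simp)
  simpa [PySem.Set.update_nil_left, PySem.List.dedup_eq_ofList] using h

def ndAux {α : Type} [DecidableEq α] (t : List α) : List α → List α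
  | [] => []
  | x :: l => if x ∈ t then ndAux t l else x :: ndAux (t ++ [x]) l

lemma update_eq_append_ndAux {α : Type} [BEq α] [LawfulBEq α] [DecidableEq α] :
    ∀ (l t s : List α), (∀ x, x ∈ s ↔ x ∈ t) → PySem.Set.update s l = s ++ ndAux t l := by
  intro l
  induction l with
  | nil => intro t s _; rw [PySem.Set.update_nil]; simp [ndAux]
  | cons x l ih =>
    intro t s h
    rw [PySem.Set.update_cons]
    by_cases hx : x ∈ t
    · rw [PySem.Set.add_of_mem ((h x).mpr hx),
        show ndAux t (x :: l) = ndAux t l by simp [ndAux, hx]]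
      exact ih t s h
    · rw [PySem.Set.add_of_not_mem (fun hc => hx ((h x).mp hc)),
        show ndAux t (x :: l) = x :: ndAux (t ++ [x]) l by simp [ndAux, hx]]
      rw [ih (t ++ [x]) (s ++ [x]) (by intro y; simp [h y])]
      simp

lemma dedup_eq_ndAux {α : Type} [BEq α] [LawfulBEq α] [DecidableEq α] (l : List α) :
    PySem.List.dedup l = ndAux [] l := by
  have h := update_eq_append_ndAux l [] [] (by simp)
  simpa [PySem.Set.update_nil_left, PySem.List.dedup_eq_ofList] using h

lemma insert_getD_self {κ ν : Type} [BEq κ] [LawfulBEq κ] (d : PySem.Dict κ ν) (k : κ) (dflt : ν)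
    (hc : d.contains k = true) (hnd : d.keys.Nodup) :
    d.insert k (d.getD k dflt) = d := by
  apply PySem.Dict.ext
  rw [PySem.Dict.items_insert_of_contains d _ hc]
  rw [show d.items.map (fun p => if p.1 == k then (k, d.getD k dflt) else p) = d.items.map id from
    List.map_congr_left ?_, List.map_id]
  intro p hp
  by_cases hk : p.1 = k
  · have h2 : d.getD k dflt = p.2 :=
      PySem.Dict.getD_of_mem_items d (by rw [← hk]; simpa using hp) hnd dflt
    simp [hk, h2]
    exact Prod.ext_iff.mpr ⟨hk.symm, rfl⟩
  · simp [hk]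

lemma sess_foldl_eq {κ ν : Type} [BEq κ] [LawfulBEq κ] [DecidableEq κ] [BEq ν] [LawfulBEq ν]
    [DecidableEq ν] :
    ∀ (l t : List (κ × ν)) (d : PySem.Dict κ (List ν)),
      d.keys.Nodup →
      (∀ p : κ × ν, p.2 ∈ d.getD p.1 [] ↔ p ∈ t) →
      l.foldl (fun d p => PySem.Dict.insert d p.1 (PySem.Set.add (PySem.Dict.getD d p.1 []) p.2)) d
        = (ndAux t l).foldl
            (fun d p => PySem.Dict.insert d p.1 (PySem.Dict.getD d p.1 [] ++ [p.2])) d := by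
  intro l
  induction l with
  | nil => intro t d _ _; rfl
  | cons p l ih =>
    intro t d hnd hinv
    by_cases hp : p ∈ t
    · rw [show ndAux t (p :: l) = ndAux t l from by simp [ndAux, hp], List.foldl_cons]
      have hmem : p.2 ∈ d.getD p.1 [] := (hinv p).mpr hp
      have hc : d.contains p.1 = true := by
        by_contra hcc
        rw [PySem.Dict.getD_of_not_contains d [] (by simpa using hcc)] at hmem
        cases hmem
      rw [PySem.Set.add_of_mem hmem, insert_getD_self d p.1 [] hc hnd]
      exact ih t d hnd hinv
    · rw [show ndAux t (p :: l) = p :: ndAux (t ++ [p]) l from by simp [ndAux, hp],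
        List.foldl_cons, List.foldl_cons]
      have hmem : p.2 ∉ d.getD p.1 [] := fun hc => hp ((hinv p).mp hc)
      rw [PySem.Set.add_of_not_mem hmem]
      refine ih (t ++ [p]) _ ?_ ?_
      · exact PySem.Dict.nodup_keys_insert d _ _ hnd
      · intro q
        rw [PySem.Dict.getD_insert]
        by_cases hq : q.1 = p.1
        · rw [if_pos hq]
          have h1 := hinv q
          rw [hq] at h1
          simp only [List.mem_append, List.mem_singleton]
          constructor
          · rintro (hin | hin)
            · exact Or.inl (h1.mp hin)
            · exact Or.inr (Prod.ext_iff.mpr ⟨hq, hin⟩)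
          · rintro (hin | hin)
            · exact Or.inl (h1.mpr hin)
            · subst hin; exact Or.inr rfl
        · rw [if_neg hq]
          have h1 := hinv q
          simp only [List.mem_append, List.mem_singleton]
          constructor
          · intro hin; exact Or.inl (h1.mp hin)
          · rintro (hin | hin)
            · exact h1.mpr hin
            · subst hin; exact absurd rfl hq


lemma map_filter_eq_filterMap {β α : Type} (p : β → Prop) [DecidablePred p] (g : β → α) :
    ∀ l : List β, (l.filter (fun x => decide (p x))).map g
      = l.filterMap (fun x => if p x then some (g x) else none) := by
  intro l
  induction l with
  | nil => rfl
  | cons x l ih => by_cases hx : p x <;> simp [hx, ih]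

-- ---- A's loop split into its four independent accumulators ----

def csStep (d : PySem.Dict String Int) (row : List (String × String)) : PySem.Dict String Int :=
  if rowGet row "canonical_label" ∈ TARGET_CATEGORIES ∧ rowGet row "source" ∈ TARGET_SOURCES then
    PySem.Dict.insert d ("category_source:" ++ rowGet row "canonical_label" ++ "|" ++ rowGet row "source")
      (PySem.Dict.getD d ("category_source:" ++ rowGet row "canonical_label" ++ "|" ++ rowGet row "source") 0 + 1)
  else d

def crStep (d : PySem.Dict String Int) (row : List (String × String)) : PySem.Dict String Int :=
  if rowGet row "canonical_label" ∈ TARGET_CATEGORIES ∧ rowGet row "row_source" ∈ TARGET_ROW_SOURCES then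
    PySem.Dict.insert d ("category_row_source:" ++ rowGet row "canonical_label" ++ "|" ++ rowGet row "row_source")
      (PySem.Dict.getD d ("category_row_source:" ++ rowGet row "canonical_label" ++ "|" ++ rowGet row "row_source") 0 + 1)
  else d

def srStep (d : PySem.Dict String Int) (row : List (String × String)) : PySem.Dict String Int :=
  if rowGet row "source" ∈ TARGET_SOURCES ∧ rowGet row "row_source" ∈ TARGET_ROW_SOURCES then
    PySem.Dict.insert d ("source_row_source:" ++ rowGet row "source" ++ "|" ++ rowGet row "row_source")
      (PySem.Dict.getD d ("source_row_source:" ++ rowGet row "source" ++ "|" ++ rowGet row "row_source") 0 + 1)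
  else d

def sbStep (d : PySem.Dict String (PySem.Set String)) (row : List (String × String)) :
    PySem.Dict String (PySem.Set String) :=
  if rowGet row "source" ∈ TARGET_SOURCES ∧ rowGet row "session_id" ≠ "" then
    PySem.Dict.insert d (rowGet row "source")
      (PySem.Set.add (PySem.Dict.getD d (rowGet row "source") PySem.Set.empty) (rowGet row "session_id"))
  else d

lemma loop_proj :
    ∀ (rows : List (List (String × String))) (a b c : PySem.Dict String Int)
      (d : PySem.Dict String (PySem.Set String)),
      rows.foldl buildLoopStep (a, b, c, d)
        = (rows.foldl csStep a, rows.foldl crStep b, rows.foldl srStep c, rows.foldl sbStep d) := by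
  intro rows
  induction rows with
  | nil => intro a b c d; rfl
  | cons row rows ih =>
    intro a b c d
    rw [List.foldl_cons, List.foldl_cons, List.foldl_cons, List.foldl_cons, List.foldl_cons,
      show buildLoopStep (a, b, c, d) row
        = (csStep a row, crStep b row, srStep c row, sbStep d row) from rfl]
    exact ih _ _ _ _

-- conditional key of each Counter (A) = triple-derived key (B)
def csKey? (row : List (String × String)) : Option String :=
  if rowGet row "canonical_label" ∈ TARGET_CATEGORIES ∧ rowGet row "source" ∈ TARGET_SOURCES then
    some ("category_source:" ++ rowGet row "canonical_label" ++ "|" ++ rowGet row "source")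
  else none

def crKey? (row : List (String × String)) : Option String :=
  if rowGet row "canonical_label" ∈ TARGET_CATEGORIES ∧ rowGet row "row_source" ∈ TARGET_ROW_SOURCES then
    some ("category_row_source:" ++ rowGet row "canonical_label" ++ "|" ++ rowGet row "row_source")
  else none

def srKey? (row : List (String × String)) : Option String :=
  if rowGet row "source" ∈ TARGET_SOURCES ∧ rowGet row "row_source" ∈ TARGET_ROW_SOURCES then
    some ("source_row_source:" ++ rowGet row "source" ++ "|" ++ rowGet row "row_source")
  else none

lemma foldl_match_filterMap {σ γ R : Type} (step : σ → R → σ) (key? : R → Option γ)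
    (g : σ → γ → σ)
    (hstep : ∀ d row, step d row = (key? row).elim d (fun k => g d k)) :
    ∀ (rows : List R) (d : σ),
      rows.foldl step d = (rows.filterMap key?).foldl g d := by
  intro rows
  induction rows with
  | nil => intro d; rfl
  | cons row rows ih =>
    intro d
    rw [List.foldl_cons, List.filterMap_cons, hstep]
    cases hk : key? row with
    | none => exact ih d
    | some k => exact ih _

lemma csStep_eq (d : PySem.Dict String Int) (row : List (String × String)) :
    csStep d row = (csKey? row).elim d (fun k => PySem.Dict.insert d k (PySem.Dict.getD d k 0 + 1)) := by
  unfold csStep csKey?; split <;> rfl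

lemma crStep_eq (d : PySem.Dict String Int) (row : List (String × String)) :
    crStep d row = (crKey? row).elim d (fun k => PySem.Dict.insert d k (PySem.Dict.getD d k 0 + 1)) := by
  unfold crStep crKey?; split <;> rfl

lemma srStep_eq (d : PySem.Dict String Int) (row : List (String × String)) :
    srStep d row = (srKey? row).elim d (fun k => PySem.Dict.insert d k (PySem.Dict.getD d k 0 + 1)) := by
  unfold srStep srKey?; split <;> rfl

-- one counter stage: updating the universe with the Counter's keys (A) =
-- updating it with the keys derived from the deduplicated triples (B)
lemma counter_stage (step : PySem.Dict String Int → List (String × String) → PySem.Dict String Int)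
    (key? : List (String × String) → Option String)
    (hstep : ∀ d row, step d row = (key? row).elim d
      (fun k => PySem.Dict.insert d k (PySem.Dict.getD d k 0 + 1)))
    {γ : Type} [BEq γ] [LawfulBEq γ] (f : List (String × String) → γ)
    (p : γ → Prop) [DecidablePred p] (g : γ → String)
    (hkey : ∀ row, key? row = if p (f row) then some (g (f row)) else none)
    (u : List String) (rows : List (List (String × String))) :
    PySem.Set.update u (PySem.Dict.keys (rows.foldl step PySem.Dict.empty))
      = PySem.Set.update u
          (((PySem.List.dedup (rows.map f)).filter (fun t => decide (p t))).map g) := by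
  rw [foldl_match_filterMap step key? (fun d k => PySem.Dict.insert d k (PySem.Dict.getD d k 0 + 1)) hstep rows PySem.Dict.empty,
    PySem.Dict.keys_foldl_insert, PySem.Dict.keys_empty, PySem.Set.update_nil_left,
    ← PySem.List.dedup_eq_ofList, update_dedup,
    map_filter_eq_filterMap p g, update_filterMap_dedup, List.filterMap_map]
  congr 1
  refine List.filterMap_congr ?_
  intro row _
  rw [Function.comp_apply, ← hkey]


lemma present_filter_eq {γ : Type} [BEq γ] [LawfulBEq γ] (tgt : List String)
    (rows : List (List (String × String))) (key : String)
    (f : List (String × String) → γ) (sel : γ → String)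
    (hsel : ∀ row, sel (f row) = rowGet row key) :
    tgt.filter (fun n => (PySem.Set.ofList (rows.map (fun row => rowGet row key))).contains n)
      = tgt.filter (fun n => (PySem.List.dedup (rows.map f)).any (fun t => sel t == n)) := by
  refine List.filter_congr ?_
  intro n _
  rw [Bool.eq_iff_iff]
  simp only [PySem.Set.contains_iff, PySem.Set.mem_ofList, List.any_eq_true,
    PySem.List.mem_dedup, List.mem_map, beq_iff_eq]
  constructor
  · rintro ⟨row, hrow, hr⟩
    exact ⟨f row, ⟨row, hrow, rfl⟩, by rw [hsel, hr]⟩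
  · rintro ⟨t, ⟨row, hrow, ht⟩, hs⟩
    exact ⟨row, hrow, by rw [← hs, ← ht, hsel]⟩

def pairOf? (row : List (String × String)) : Option (String × String) :=
  if rowGet row "source" ∈ TARGET_SOURCES ∧ rowGet row "session_id" ≠ "" then
    some (rowGet row "source", rowGet row "session_id")
  else none

lemma sbStep_eq (d : PySem.Dict String (PySem.Set String)) (row : List (String × String)) :
    sbStep d row = (pairOf? row).elim d
      (fun pr => PySem.Dict.insert d pr.1 (PySem.Set.add (PySem.Dict.getD d pr.1 []) pr.2)) := by
  unfold sbStep pairOf?; split <;> rfl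

lemma sess_stage (u : PySem.Set String) (rows : List (List (String × String))) :
    List.foldl (fun u it =>
        (PySem.List.slice (PySem.List.sorted it.2 (fun x => x) false) none (some 2)).foldl
          (fun u2 session => PySem.Set.add u2 ("session:" ++ session)) u) u
      (PySem.Dict.items (rows.foldl sbStep PySem.Dict.empty))
      = List.foldl (fun u es =>
          (PySem.List.slice (PySem.List.sorted es (fun x => x) false) none (some 2)).foldl
            (fun u2 session => PySem.Set.add u2 ("session:" ++ session)) u) u
        (PySem.Dict.values ((PySem.List.dedup (rows.filterMap pairOf?)).foldl
          (fun d p => PySem.Dict.insert d p.1 (PySem.Dict.getD d p.1 [] ++ [p.2]))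
          PySem.Dict.empty)) := by
  rw [foldl_match_filterMap sbStep pairOf? (fun d pr => PySem.Dict.insert d pr.1 (PySem.Set.add (PySem.Dict.getD d pr.1 []) pr.2)) sbStep_eq rows PySem.Dict.empty]
  rw [sess_foldl_eq (rows.filterMap pairOf?) [] PySem.Dict.empty
    (by simp [PySem.Dict.keys_empty]) (by intro p; simp [PySem.Dict.getD_empty])]
  rw [← dedup_eq_ndAux]
  simp only [show ∀ d : PySem.Dict String (List String), d.values = d.items.map (fun p => p.2)
    from fun _ => rfl, List.foldl_map]

-- ---- main assembly ----

lemma build_universe_eq (rows : List (List (String × String))) :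
    build_universe rows = build_universe_alt rows := by
  unfold build_universe build_universe_alt
  rw [loop_proj]
  simp only
  rw [present_filter_eq TARGET_CATEGORIES rows "canonical_label"
        (fun row => (rowGet row "canonical_label", rowGet row "source", rowGet row "row_source"))
        (fun t => t.1) (fun _ => rfl),
      present_filter_eq TARGET_SOURCES rows "source"
        (fun row => (rowGet row "canonical_label", rowGet row "source", rowGet row "row_source"))
        (fun t => t.2.1) (fun _ => rfl),
      present_filter_eq TARGET_ROW_SOURCES rows "row_source"
        (fun row => (rowGet row "canonical_label", rowGet row "source", rowGet row "row_source"))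
        (fun t => t.2.2) (fun _ => rfl)]
  rw [counter_stage csStep csKey? csStep_eq
        (f := fun row => (rowGet row "canonical_label", rowGet row "source", rowGet row "row_source"))
        (p := fun t => t.1 ∈ TARGET_CATEGORIES ∧ t.2.1 ∈ TARGET_SOURCES)
        (g := fun t => "category_source:" ++ t.1 ++ "|" ++ t.2.1) (fun _ => rfl)]
  rw [counter_stage crStep crKey? crStep_eq
        (f := fun row => (rowGet row "canonical_label", rowGet row "source", rowGet row "row_source"))
        (p := fun t => t.1 ∈ TARGET_CATEGORIES ∧ t.2.2 ∈ TARGET_ROW_SOURCES)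
        (g := fun t => "category_row_source:" ++ t.1 ++ "|" ++ t.2.2) (fun _ => rfl)]
  rw [counter_stage srStep srKey? srStep_eq
        (f := fun row => (rowGet row "canonical_label", rowGet row "source", rowGet row "row_source"))
        (p := fun t => t.2.1 ∈ TARGET_SOURCES ∧ t.2.2 ∈ TARGET_ROW_SOURCES)
        (g := fun t => "source_row_source:" ++ t.2.1 ++ "|" ++ t.2.2) (fun _ => rfl)]
  rw [sess_stage]
  rfl

-- ===== VERDICT (by name: the statement is the Claim_ definition above) =====
theorem build_universe_spec : Claim_equal_build_universe := by
  intro rows _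
  unfold Spec_build_universe
  exact build_universe_eq rows
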